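-- pv_equiv track=rewrite | github.com/LyraVoid/Mizuki | scripts/update_series.py | add_series_to_frontmatter
-- ===== SOURCE A (Python) =====
-- def add_series_to_frontmatter(fm_str, series_name, series_order):
--     """在 frontmatter 中添加 series 和 seriesOrder 字段。
--     插入到 category 字段之后（如果有的话），否则插入到末尾。
--     """
--     lines = fm_str.split('\n')
--     new_lines = []
--     inserted = False
--
--     for line in lines:
--         new_lines.append(line)
--         # 在 category 行之后插入
--         if not inserted and line.strip().startswith('category:'):
--             new_lines.append(f"series: '{series_name}'")
--             new_lines.append(f"seriesOrder: {series_order}")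
--             inserted = True
--
--     # 如果没有 category 字段，在 tags 后面插入
--     if not inserted:
--         final_lines = []
--         for line in new_lines:
--             final_lines.append(line)
--             if not inserted and line.strip().startswith('tags:'):
--                 final_lines.append(f"series: '{series_name}'")
--                 final_lines.append(f"seriesOrder: {series_order}")
--                 inserted = True
--         if inserted:
--             new_lines = final_lines
--
--     # 最后兜底：直接追加到末尾
--     if not inserted:
--         new_lines.append(f"series: '{series_name}'")
--         new_lines.append(f"seriesOrder: {series_order}")
--
--     return '\n'.join(new_lines)
-- ===== SOURCE B (Python) =====
-- def add_series_to_frontmatter(fm_str, series_name, series_order):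
--     lines = fm_str.split('\n')
--     pos = next((i + 1 for i, l in enumerate(lines)
--                 if l.strip().startswith('category:')), None)
--     if pos is None:
--         pos = next((i + 1 for i, l in enumerate(lines)
--                     if l.strip().startswith('tags:')), len(lines))
--     ins = [f"series: '{series_name}'", f"seriesOrder: {series_order}"]
--     return '\n'.join(lines[:pos] + ins + lines[pos:])
-- ===== Notes on version B (the rewrite author's own statement) =====
-- stated objective: simpler
-- what changed: B computes the splice index once (first 'category:' line, else first 'tags:' line, else end) and builds the result by list slicing, replacing A's two flag-driven append loops and fallback append.
import Mathlib
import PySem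

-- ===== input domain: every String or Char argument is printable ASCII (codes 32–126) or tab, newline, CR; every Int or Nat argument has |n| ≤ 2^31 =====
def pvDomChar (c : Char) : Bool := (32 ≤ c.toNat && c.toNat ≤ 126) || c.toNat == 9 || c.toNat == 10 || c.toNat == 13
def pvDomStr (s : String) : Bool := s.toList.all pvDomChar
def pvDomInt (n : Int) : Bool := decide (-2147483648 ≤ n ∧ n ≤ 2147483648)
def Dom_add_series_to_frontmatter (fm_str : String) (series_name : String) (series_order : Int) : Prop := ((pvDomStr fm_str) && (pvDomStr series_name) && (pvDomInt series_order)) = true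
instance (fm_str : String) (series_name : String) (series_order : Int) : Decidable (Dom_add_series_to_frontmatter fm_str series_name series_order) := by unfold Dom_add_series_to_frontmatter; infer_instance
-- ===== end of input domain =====

-- B replaces A's two flag-driven append loops with one splice-index computation and slicing; same cost, shorter.

-- ===== PORT A =====
-- the two lines A inserts (f-strings)
def pvIns (series_name : String) (series_order : Int) : List String :=
  ["series: '" ++ series_name ++ "'", "seriesOrder: " ++ PySem.Int.toStr series_order]

-- one step of A's flag-driven append loop for predicate p (used for both passes)
def pvStep (p : String → Bool) (ins : List String) (st : List String × Bool) (line : String) :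
    List String × Bool :=
  let nl := st.1 ++ [line]
  if !st.2 && p line then (nl ++ ins, true) else (nl, st.2)

def pvCat (line : String) : Bool := PySem.Str.startswith (PySem.Str.strip line) "category:"
def pvTags (line : String) : Bool := PySem.Str.startswith (PySem.Str.strip line) "tags:"

def add_series_to_frontmatter (fm_str : String) (series_name : String) (series_order : Int) : String :=
  let lines := (PySem.Str.split? fm_str "\n").getD []  -- sep "\n" is non-empty, split? is always some
  let ins := pvIns series_name series_order
  -- first loop: insert after the first 'category:' line
  let st := lines.foldl (pvStep pvCat ins) ([], false)
  -- second loop (only if not inserted): insert after the first 'tags:' line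
  let st2 :=
    if !st.2 then
      let st' := st.1.foldl (pvStep pvTags ins) ([], st.2)
      if st'.2 then st' else st
    else st
  -- fallback: append at the end
  let newLines := if !st2.2 then st2.1 ++ ins else st2.1
  PySem.Str.join "\n" newLines

-- ===== PORT B =====
def add_series_to_frontmatter_alt (fm_str : String) (series_name : String) (series_order : Int) : String :=
  let lines := (PySem.Str.split? fm_str "\n").getD []  -- sep "\n" is non-empty, split? is always some
  let pos :=
    match lines.findIdx? pvCat with
    | some i => i + 1
    | none =>
      match lines.findIdx? pvTags with
      | some i => i + 1
      | none => lines.length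
  let ins := pvIns series_name series_order
  PySem.Str.join "\n" (lines.take pos ++ ins ++ lines.drop pos)

-- ===== PRECONDITION & SPEC =====
def Spec_add_series_to_frontmatter (fm_str : String) (series_name : String) (series_order : Int) (out : String) : Prop := out = add_series_to_frontmatter_alt fm_str series_name series_order
instance (fm_str : String) (series_name : String) (series_order : Int) (out : String) : Decidable (Spec_add_series_to_frontmatter fm_str series_name series_order out) := by unfold Spec_add_series_to_frontmatter; infer_instance

-- ===== CLAIM (what is proved, stated in full; the proofs are below) =====
def Claim_equal_add_series_to_frontmatter : Prop := ∀ (fm_str : String) (series_name : String) (series_order : Int), Dom_add_series_to_frontmatter fm_str series_name series_order → Spec_add_series_to_frontmatter fm_str series_name series_order (add_series_to_frontmatter fm_str series_name series_order)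

-- ===== LEMMAS AND PROOFS =====

-- once inserted, the loop only copies
theorem pvStep_foldl_true (p : String → Bool) (ins : List String) (lines acc : List String) :
    lines.foldl (pvStep p ins) (acc, true) = (acc ++ lines, true) := by
  induction lines generalizing acc with
  | nil => simp
  | cons l ls ih => simp [pvStep, ih]

-- A's flag loop from a not-yet-inserted state = splice after the first p-line (or copy, flag false)
theorem pvStep_foldl_false (p : String → Bool) (ins : List String) (lines acc : List String) :
    lines.foldl (pvStep p ins) (acc, false) =
      match lines.findIdx? p with
      | none => (acc ++ lines, false)
      | some i => (acc ++ (lines.take (i + 1) ++ ins ++ lines.drop (i + 1)), true) := by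
  induction lines generalizing acc with
  | nil => simp
  | cons l ls ih =>
    rw [List.foldl_cons]
    by_cases h : p l
    · simp [pvStep, h, pvStep_foldl_true, List.findIdx?_cons]
    · rw [show pvStep p ins (acc, false) l = (acc ++ [l], false) by simp [pvStep, h]]
      rw [ih]
      cases hf : ls.findIdx? p with
      | none => simp [List.findIdx?_cons, h, hf]
      | some i => simp [List.findIdx?_cons, h, hf]

theorem add_series_to_frontmatter_spec : Claim_equal_add_series_to_frontmatter := by
  intro fm_str series_name series_order _
  unfold Spec_add_series_to_frontmatter add_series_to_frontmatter add_series_to_frontmatter_alt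
  set lines := (PySem.Str.split? fm_str "\n").getD []  -- sep "\n" is non-empty, split? is always some with hl
  set ins := pvIns series_name series_order with hi
  simp only [pvStep_foldl_false, List.nil_append]
  cases hc : lines.findIdx? pvCat with
  | some i => simp
  | none =>
    simp only
    cases ht : lines.findIdx? pvTags with
    | some j => simp [pvStep_foldl_false, ht]
    | none => simp [pvStep_foldl_false, ht]
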